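-- pv_equiv track=rewrite | github.com/shaneholloman/skills-nemo | nemo_skills/evaluation/evaluator/contextasr.py | _merge_single_letters
-- ===== SOURCE A (Python) =====
-- def _merge_single_letters(text):
--     """Combine adjacent single letters separated by spaces."""
--     words = text.split()
--     current = []
--     result = []
--     for word in words:
--         first_char = word[0]
--         remaining = word[1:] if len(word) > 1 else ""
--         if first_char.islower() or first_char.isupper():
--             if remaining == "" or remaining == "s" or remaining == "'s":
--                 current.append(first_char)
--                 if remaining:
--                     current.append(remaining)
--             else:
--                 if current:
--                     result.append("".join(current))
--                     current = []
--                 result.append(word)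
--         else:
--             if current:
--                 result.append("".join(current))
--                 current = []
--             result.append(word)
--     if current:
--         result.append("".join(current))
--     return " ".join(result)
-- ===== SOURCE B (Python) =====
-- def _mergeable(w):
--     """A word joins a merge run iff it is a single letter, optionally followed by "s" or "'s"."""
--     return (w[0].islower() or w[0].isupper()) and w[1:] in ("", "s", "'s")
--
--
-- def _merge_single_letters(text):
--     """Combine adjacent single letters separated by spaces."""
--     words = text.split()
--     out = []
--     i = 0
--     n = len(words)
--     while i < n:
--         if _mergeable(words[i]):
--             j = i
--             while j < n and _mergeable(words[j]):
--                 j += 1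
--             out.append("".join(words[i:j]))
--             i = j
--         else:
--             out.append(words[i])
--             i += 1
--     return " ".join(out)
-- ===== Notes on version B (the rewrite author's own statement) =====
-- stated objective: simpler
-- what changed: Replaces A's flush-buffer accumulator (current/result with the flush code duplicated in three places) by a single merge-run predicate and a run-grouping scan that joins each maximal run of single-letter words in one step, exploiting that concatenating a run's words equals A's buffer join.
import Mathlib
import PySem

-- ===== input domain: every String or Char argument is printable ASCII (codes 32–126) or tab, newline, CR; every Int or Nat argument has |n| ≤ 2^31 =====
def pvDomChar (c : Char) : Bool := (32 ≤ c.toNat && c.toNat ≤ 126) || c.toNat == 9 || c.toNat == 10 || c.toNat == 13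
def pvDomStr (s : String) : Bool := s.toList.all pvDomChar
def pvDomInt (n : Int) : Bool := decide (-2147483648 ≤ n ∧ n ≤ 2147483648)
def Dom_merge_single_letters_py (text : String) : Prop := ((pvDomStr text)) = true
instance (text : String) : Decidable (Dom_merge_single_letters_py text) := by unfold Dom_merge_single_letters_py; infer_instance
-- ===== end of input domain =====

-- B replaces A's flush-buffer accumulator by a 'mergeable' predicate and a run-grouping scan
-- (each maximal run of mergeable words joined in one step); simpler, same O(n) cost.

-- ===== PORT A =====
-- the loop 'for word in words' with state (current, result); flush = append "".join(current) and reset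
def mslLoopA : List (List Char) → List (List Char) → List (List Char) → List (List Char)
  | [], current, result =>
      -- if current: result.append("".join(current))
      if current = [] then result else result ++ [PySem.Chars.join [] current]
  | word :: ws, current, result =>
      let first_char := word.headD ' '   -- word[0]; split() yields only nonempty words, default never read
      let remaining := word.tail          -- word[1:] if len(word) > 1 else ""
      if PySem.Chars.islower first_char || PySem.Chars.isupper first_char then
        if remaining = [] ∨ remaining = ['s'] ∨ remaining = ['\'', 's'] then
          -- current.append(first_char); if remaining: current.append(remaining)
          mslLoopA ws (current ++ [first_char] :: (if remaining = [] then [] else [remaining])) result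
        else
          -- flush current, then result.append(word)
          mslLoopA ws [] (if current = [] then result ++ [word] else result ++ [PySem.Chars.join [] current, word])
      else
        mslLoopA ws [] (if current = [] then result ++ [word] else result ++ [PySem.Chars.join [] current, word])

def merge_single_letters_py (text : String) : String :=
  String.ofList (PySem.Chars.join [' '] (mslLoopA (PySem.Chars.split₀ text.toList) [] []))

-- ===== PORT B =====
-- _mergeable(w) = (w[0].islower() or w[0].isupper()) and w[1:] in ("", "s", "'s")
def mslMergeable (w : List Char) : Bool :=
  match w with
  | [] => false   -- unreachable: split() yields only nonempty words (w[0] would raise)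
  | c :: rest =>
      (PySem.Chars.islower c || PySem.Chars.isupper c) &&
        (rest = [] || rest = ['s'] || rest = ['\'', 's'])

-- the while loop over indices i ≤ j: the inner 'while j < n and _mergeable' is takeWhile/dropWhile
def mslRuns : List (List Char) → List (List Char)
  | [] => []
  | w :: ws =>
      if mslMergeable w then
        PySem.Chars.join [] (w :: ws.takeWhile mslMergeable) :: mslRuns (ws.dropWhile mslMergeable)
      else
        w :: mslRuns ws
  termination_by l => l.length
  decreasing_by
    · have := List.length_dropWhile_le mslMergeable ws; simp; omega
    · simp

def merge_single_letters_py_alt (text : String) : String :=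
  String.ofList (PySem.Chars.join [' '] (mslRuns (PySem.Chars.split₀ text.toList)))

-- ===== PRECONDITION & SPEC =====
def Spec_merge_single_letters_py (text : String) (out : String) : Prop := out = merge_single_letters_py_alt text
instance (text : String) (out : String) : Decidable (Spec_merge_single_letters_py text out) := by unfold Spec_merge_single_letters_py; infer_instance

-- ===== CLAIM (what is proved, stated in full; the proofs are below) =====
def Claim_equal_merge_single_letters_py : Prop := ∀ (text : String), Dom_merge_single_letters_py text → Spec_merge_single_letters_py text (merge_single_letters_py text)

-- ===== LEMMAS AND PROOFS =====

-- "".join over a cons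
lemma mslJoin_nil_cons (a : List Char) (l : List (List Char)) :
    PySem.Chars.join [] (a :: l) = a ++ PySem.Chars.join [] l := by
  cases l with
  | nil => simp [PySem.Chars.join_singleton, PySem.Chars.join_nil]
  | cons b t => simp [PySem.Chars.join_cons_cons]

-- "".join distributes over ++
lemma mslJoin_nil_append (l₁ l₂ : List (List Char)) :
    PySem.Chars.join [] (l₁ ++ l₂) = PySem.Chars.join [] l₁ ++ PySem.Chars.join [] l₂ := by
  induction l₁ with
  | nil => simp [PySem.Chars.join_nil]
  | cons a t ih => simp [mslJoin_nil_cons, ih]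

-- the pieces A pushes into its buffer for a word join back to the word itself
lemma mslPieces_join (w : List Char) :
    PySem.Chars.join [] ([w.headD ' '] :: (if w.tail = [] then [] else [w.tail])) = w.headD ' ' :: w.tail := by
  by_cases h : w.tail = [] <;>
    simp [h, PySem.Chars.join_singleton, PySem.Chars.join_cons_cons]

-- A's nested conditions are exactly B's predicate
lemma mslMergeable_eq (w : List Char) :
    mslMergeable w =
      ((PySem.Chars.islower (w.headD ' ') || PySem.Chars.isupper (w.headD ' ')) &&
        (decide (w.tail = []) || decide (w.tail = ['s']) || decide (w.tail = ['\'', 's']))) := by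
  cases w with
  | nil => decide
  | cons c rest => rfl

-- a mergeable word is nonempty, hence headD/tail recompose it
lemma mslMergeable_recompose (w : List Char) (h : mslMergeable w = true) :
    w.headD ' ' :: w.tail = w := by
  cases w with
  | nil => simp [mslMergeable] at h
  | cons c rest => rfl

-- the loop of A with buffer state equals B's run grouping
lemma mslLoopA_eq_runs (ws : List (List Char)) : ∀ (cur res : List (List Char)),
    mslLoopA ws cur res =
      if cur = [] then res ++ mslRuns ws
      else res ++ (PySem.Chars.join [] cur ++ PySem.Chars.join [] (ws.takeWhile mslMergeable))
              :: mslRuns (ws.dropWhile mslMergeable) := by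
  induction ws with
  | nil =>
    intro cur res
    by_cases hc : cur = [] <;>
      simp [mslLoopA, mslRuns, hc, PySem.Chars.join_nil]
  | cons w ws ih =>
    intro cur res
    by_cases hm : mslMergeable w = true
    · -- merge branch of A; w starts or extends a run in B
      have hb : (PySem.Chars.islower (w.headD ' ') || PySem.Chars.isupper (w.headD ' ')) = true ∧
          (w.tail = [] ∨ w.tail = ['s'] ∨ w.tail = ['\'', 's']) := by
        have h := (mslMergeable_eq w) ▸ hm
        simp only [Bool.and_eq_true, Bool.or_eq_true, decide_eq_true_eq] at h
        refine ⟨by simp only [Bool.or_eq_true]; tauto, by tauto⟩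
      have hrec := mslMergeable_recompose w hm
      simp only [mslLoopA]
      rw [if_pos hb.1, if_pos hb.2, ih]
      have hne : cur ++ [w.headD ' '] :: (if w.tail = [] then [] else [w.tail]) ≠ [] := by
        simp
      rw [if_neg hne]
      have hj : PySem.Chars.join [] (cur ++ [w.headD ' '] :: (if w.tail = [] then [] else [w.tail]))
          = PySem.Chars.join [] cur ++ w := by
        rw [mslJoin_nil_append, mslPieces_join, hrec]
      rw [List.takeWhile_cons_of_pos hm, List.dropWhile_cons_of_pos hm, hj]
      by_cases hc : cur = []
      · subst hc
        rw [if_pos rfl]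
        simp only [mslRuns, if_pos hm]
        rw [mslJoin_nil_cons]
        simp only [PySem.Chars.join_nil, List.nil_append]
      · rw [if_neg hc, mslJoin_nil_cons, List.append_assoc]
    · -- flush branch of A; w ends any run in B
      have hm' : mslMergeable w = false := by simpa using hm
      have hcond := (mslMergeable_eq w) ▸ hm'
      simp only [Bool.and_eq_false_iff, Bool.or_eq_false_iff, decide_eq_false_iff_not] at hcond
      have hflush : mslLoopA (w :: ws) cur res =
          mslLoopA ws [] (if cur = [] then res ++ [w] else res ++ [PySem.Chars.join [] cur, w]) := by
        rcases hcond with h1 | h2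
        · simp only [mslLoopA]
          rw [if_neg (fun hcontra => by rw [h1.1, h1.2] at hcontra; simp at hcontra)]
        · have h2' : ¬ (w.tail = [] ∨ w.tail = ['s'] ∨ w.tail = ['\'', 's']) := by tauto
          simp only [mslLoopA, if_neg h2', ite_self]
      have htw : List.takeWhile mslMergeable (w :: ws) = [] := by
        simp [hm']
      have hdw : List.dropWhile mslMergeable (w :: ws) = w :: ws := by
        simp [hm']
      rw [hflush, ih, if_pos rfl, htw, hdw]
      by_cases hc : cur = []
      · subst hc
        simp [mslRuns, hm']
      · rw [if_neg hc, if_neg hc]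
        simp [mslRuns, hm', PySem.Chars.join_nil]

-- ===== VERDICT (by name: the statement is the Claim_ definition above) =====
theorem merge_single_letters_py_spec : Claim_equal_merge_single_letters_py := by
  intro text _
  unfold Spec_merge_single_letters_py merge_single_letters_py merge_single_letters_py_alt
  rw [mslLoopA_eq_runs]
  simp
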